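-- pv_equiv track=rewrite | github.com/guowenxiang/TechSinger | singing/svs/dataset.py | remove_slur
-- ===== SOURCE A (Python) =====
-- def remove_slur(types, pitches, note_durs, ph_tokens):
--     new_types = []
--     new_pitches = []
--     new_note_durs = []
--     new_ph_tokens = []
--     for i, t in enumerate(types):
--         if t != 3:
--             new_types.append(t)
--             new_pitches.append(pitches[i])
--             new_note_durs.append(note_durs[i])
--             new_ph_tokens.append(ph_tokens[i])
--     return new_types, new_pitches, new_note_durs, new_ph_tokens
-- ===== SOURCE B (Python) =====
-- def remove_slur(types, pitches, note_durs, ph_tokens):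
--     # Chunk-copy algorithm: find the slur positions (type == 3) once, then copy the
--     # runs between consecutive slurs out of all four lists wholesale with slices.
--     n = len(types)
--     new_types, new_pitches, new_note_durs, new_ph_tokens = [], [], [], []
--     start = 0
--     for cut in [i for i, t in enumerate(types) if t == 3] + [n]:
--         new_types += types[start:cut]
--         new_pitches += pitches[start:cut]
--         new_note_durs += note_durs[start:cut]
--         new_ph_tokens += ph_tokens[start:cut]
--         start = cut + 1
--     return new_types, new_pitches, new_note_durs, new_ph_tokens
-- ===== Notes on version B (the rewrite author's own statement) =====
-- stated objective: alternative
-- what changed: A filters element-by-element with one interleaved append loop; B instead locates the slur positions (type == 3) once and then copies the runs between consecutive slurs out of all four lists wholesale via slice concatenation (bulk chunk copying instead of per-element filtering).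
import Mathlib
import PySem

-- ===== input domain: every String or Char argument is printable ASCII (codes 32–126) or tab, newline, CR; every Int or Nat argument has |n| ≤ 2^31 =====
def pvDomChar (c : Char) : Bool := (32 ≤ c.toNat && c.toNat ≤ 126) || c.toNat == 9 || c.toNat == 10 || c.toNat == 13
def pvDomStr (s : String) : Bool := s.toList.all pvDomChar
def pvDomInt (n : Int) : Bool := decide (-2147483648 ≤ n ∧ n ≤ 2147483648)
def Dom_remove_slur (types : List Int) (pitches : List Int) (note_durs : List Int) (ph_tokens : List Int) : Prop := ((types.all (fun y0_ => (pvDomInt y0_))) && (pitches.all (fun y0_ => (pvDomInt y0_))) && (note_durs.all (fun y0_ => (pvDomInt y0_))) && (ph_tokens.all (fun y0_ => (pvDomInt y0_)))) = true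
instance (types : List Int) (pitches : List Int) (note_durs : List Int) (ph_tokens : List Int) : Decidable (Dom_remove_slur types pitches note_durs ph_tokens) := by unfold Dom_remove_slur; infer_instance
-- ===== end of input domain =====

-- B replaces A's per-element filter loop by locating the slur positions once and
-- copying the runs between consecutive slurs out of all four lists via slices
-- (alternative algorithm, same asymptotic cost).

-- ===== PORT A =====
-- single loop over enumerate(types), appending to four accumulators; pitches[i] etc.
-- are in range on every input admitted by Pre_, so pyGetD's default is never used there
def remove_slur (types : List Int) (pitches : List Int) (note_durs : List Int) (ph_tokens : List Int) : List Int × List Int × List Int × List Int :=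
  (PySem.List.enumerate types).foldl
    (fun (acc : List Int × List Int × List Int × List Int) (p : Int × Int) =>
      if p.2 ≠ 3 then
        (acc.1 ++ [p.2],
         acc.2.1 ++ [PySem.List.pyGetD pitches p.1 0],
         acc.2.2.1 ++ [PySem.List.pyGetD note_durs p.1 0],
         acc.2.2.2 ++ [PySem.List.pyGetD ph_tokens p.1 0])
      else acc)
    ([], [], [], [])

-- ===== PORT B =====
-- cut positions (types[i] == 3) plus the final sentinel len(types); one fold over them
-- carrying (start, four output accumulators), each step appending the slice [start:cut]
def remove_slur_alt (types : List Int) (pitches : List Int) (note_durs : List Int) (ph_tokens : List Int) : List Int × List Int × List Int × List Int :=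
  let n : Int := types.length
  let cuts := (((PySem.List.enumerate types).filter (fun p => p.2 = 3)).map (·.1)) ++ [n]
  let st := cuts.foldl
    (fun (st : Int × (List Int × List Int × List Int × List Int)) cut =>
      (cut + 1,
        (st.2.1 ++ PySem.List.slice types (some st.1) (some cut),
         st.2.2.1 ++ PySem.List.slice pitches (some st.1) (some cut),
         st.2.2.2.1 ++ PySem.List.slice note_durs (some st.1) (some cut),
         st.2.2.2.2 ++ PySem.List.slice ph_tokens (some st.1) (some cut))))
    (0, ([], [], [], []))
  st.2

-- ===== PRECONDITION & SPEC =====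
-- Pre_ excludes exactly the inputs on which Python A raises IndexError: a kept index
-- (types[i] ≠ 3) out of range for pitches, note_durs or ph_tokens.
def Pre_remove_slur (types : List Int) (pitches : List Int) (note_durs : List Int) (ph_tokens : List Int) : Prop :=
  ∀ i ∈ List.range types.length, types.getD i 0 ≠ 3 →
    i < pitches.length ∧ i < note_durs.length ∧ i < ph_tokens.length
instance (types : List Int) (pitches : List Int) (note_durs : List Int) (ph_tokens : List Int) : Decidable (Pre_remove_slur types pitches note_durs ph_tokens) := by unfold Pre_remove_slur; infer_instance
def pvWitness_remove_slur : List Int × List Int × List Int × List Int := ([1, 3, 2], [10, 11, 12], [4, 5, 6], [7, 8, 9])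

def Spec_remove_slur (types : List Int) (pitches : List Int) (note_durs : List Int) (ph_tokens : List Int) (out : List Int × List Int × List Int × List Int) : Prop := out = remove_slur_alt types pitches note_durs ph_tokens
instance (types : List Int) (pitches : List Int) (note_durs : List Int) (ph_tokens : List Int) (out : List Int × List Int × List Int × List Int) : Decidable (Spec_remove_slur types pitches note_durs ph_tokens out) := by unfold Spec_remove_slur; infer_instance

-- ===== CLAIM (what is proved, stated in full; the proofs are below) =====
def Claim_equal_remove_slur : Prop := ∀ (types : List Int) (pitches : List Int) (note_durs : List Int) (ph_tokens : List Int), Dom_remove_slur types pitches note_durs ph_tokens → Pre_remove_slur types pitches note_durs ph_tokens → Spec_remove_slur types pitches note_durs ph_tokens (remove_slur types pitches note_durs ph_tokens)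

-- ===== LEMMAS AND PROOFS =====

-- positions (as Nats, counted from offset s) where types holds 3 / does not hold 3
def cutsFrom : List Int → Nat → List Nat
  | [], _ => []
  | t :: ts, s => if t = 3 then s :: cutsFrom ts (s + 1) else cutsFrom ts (s + 1)

def keptFrom : List Int → Nat → List Nat
  | [], _ => []
  | t :: ts, s => if t = 3 then keptFrom ts (s + 1) else s :: keptFrom ts (s + 1)

-- every pair of enumerate(types, 0) reads back its own element via pyGetD
lemma snd_eq_pyGetD (types : List Int) (p : Int × Int)
    (hp : p ∈ PySem.List.enumerate types 0) : p.2 = PySem.List.pyGetD types p.1 0 := by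
  rcases (PySem.List.mem_enumerate_iff types 0 p).1 hp with ⟨k, hk, rfl⟩
  simp [PySem.List.pyGetD_natCast, List.getD_eq_getElem?_getD, hk]

-- A's fold over any pair list, with arbitrary accumulators
lemma foldA_eq (L : List (Int × Int)) (pitches note_durs ph_tokens : List Int)
    (a b c d : List Int) :
    L.foldl
      (fun (acc : List Int × List Int × List Int × List Int) (p : Int × Int) =>
        if p.2 ≠ 3 then
          (acc.1 ++ [p.2],
           acc.2.1 ++ [PySem.List.pyGetD pitches p.1 0],
           acc.2.2.1 ++ [PySem.List.pyGetD note_durs p.1 0],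
           acc.2.2.2 ++ [PySem.List.pyGetD ph_tokens p.1 0])
        else acc)
      (a, b, c, d)
    = (a ++ (L.filter (fun p => p.2 ≠ 3)).map (·.2),
       b ++ ((L.filter (fun p => p.2 ≠ 3)).map (·.1)).map (fun i => PySem.List.pyGetD pitches i 0),
       c ++ ((L.filter (fun p => p.2 ≠ 3)).map (·.1)).map (fun i => PySem.List.pyGetD note_durs i 0),
       d ++ ((L.filter (fun p => p.2 ≠ 3)).map (·.1)).map (fun i => PySem.List.pyGetD ph_tokens i 0)) := by
  induction L generalizing a b c d with
  | nil => simp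
  | cons p L ih =>
    by_cases h : p.2 = 3
    · rw [List.foldl_cons, if_neg (by simp [h]), ih]
      simp [h]
    · rw [List.foldl_cons, if_pos h, ih]
      simp [h]

-- the enumerate-filter-map index lists are the casts of keptFrom / cutsFrom
lemma filter_ne_eq_keptFrom (ts : List Int) (s : Nat) :
    ((PySem.List.enumerate ts (s : Int)).filter (fun p => p.2 ≠ 3)).map (·.1)
      = (keptFrom ts s).map (Nat.cast : Nat → Int) := by
  induction ts generalizing s with
  | nil => simp [keptFrom, PySem.List.enumerate_nil]
  | cons t ts ih =>
    rw [PySem.List.enumerate_cons,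
        show ((s : Int) + 1) = ((s + 1 : Nat) : Int) by push_cast; ring]
    by_cases h : t = 3
    · rw [List.filter_cons_of_neg (by simp [h]), ih]
      simp [keptFrom, h]
    · rw [List.filter_cons_of_pos (by simp [h]), List.map_cons, ih]
      simp [keptFrom, h]

lemma filter_eq_eq_cutsFrom (ts : List Int) (s : Nat) :
    ((PySem.List.enumerate ts (s : Int)).filter (fun p => p.2 = 3)).map (·.1)
      = (cutsFrom ts s).map (Nat.cast : Nat → Int) := by
  induction ts generalizing s with
  | nil => simp [cutsFrom, PySem.List.enumerate_nil]
  | cons t ts ih =>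
    rw [PySem.List.enumerate_cons,
        show ((s : Int) + 1) = ((s + 1 : Nat) : Int) by push_cast; ring]
    by_cases h : t = 3
    · rw [List.filter_cons_of_pos (by simp [h]), List.map_cons, ih]
      simp [cutsFrom, h]
    · rw [List.filter_cons_of_neg (by simp [h]), ih]
      simp [cutsFrom, h]

lemma mem_keptFrom (ts : List Int) (s : Nat) (i : Nat) (hi : i ∈ keptFrom ts s) :
    s ≤ i ∧ i < s + ts.length ∧ ts.getD (i - s) 0 ≠ 3 := by
  induction ts generalizing s with
  | nil => simp [keptFrom] at hi
  | cons t ts ih =>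
    by_cases h : t = 3
    · simp only [keptFrom, if_pos h] at hi
      obtain ⟨h1, h2, h3⟩ := ih (s + 1) hi
      refine ⟨by omega, by simp only [List.length_cons]; omega, ?_⟩
      have : i - s = (i - (s + 1)) + 1 := by omega
      simpa [this] using h3
    · simp only [keptFrom, if_neg h] at hi
      rcases List.mem_cons.1 hi with rfl | hi
      · exact ⟨le_refl _, by simp only [List.length_cons]; omega, by simpa using h⟩
      · obtain ⟨h1, h2, h3⟩ := ih (s + 1) hi
        refine ⟨by omega, by simp only [List.length_cons]; omega, ?_⟩
        have : i - s = (i - (s + 1)) + 1 := by omega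
        simpa [this] using h3

-- one chunk-appending fold on a single list
def chunksFold (L : List Int) (cuts : List Int) (start : Int) (acc : List Int) : Int × List Int :=
  cuts.foldl (fun st cut => (cut + 1, st.2 ++ PySem.List.slice L (some st.1) (some cut))) (start, acc)

-- B's four-accumulator fold is the tupling of four single-list chunk folds
lemma foldB_tuple (types pitches note_durs ph_tokens : List Int) (cuts : List Int)
    (start : Int) (a b c d : List Int) :
    cuts.foldl
      (fun (st : Int × (List Int × List Int × List Int × List Int)) cut =>
        (cut + 1,
          (st.2.1 ++ PySem.List.slice types (some st.1) (some cut),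
           st.2.2.1 ++ PySem.List.slice pitches (some st.1) (some cut),
           st.2.2.2.1 ++ PySem.List.slice note_durs (some st.1) (some cut),
           st.2.2.2.2 ++ PySem.List.slice ph_tokens (some st.1) (some cut))))
      (start, (a, b, c, d))
    = ((chunksFold types cuts start a).1,
       ((chunksFold types cuts start a).2,
        (chunksFold pitches cuts start b).2,
        (chunksFold note_durs cuts start c).2,
        (chunksFold ph_tokens cuts start d).2)) := by
  induction cuts generalizing start a b c d with
  | nil => simp [chunksFold]
  | cons cut cuts ih => simp only [chunksFold, List.foldl_cons] at ih ⊢; rw [ih]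

-- appending one in-range element to a drop/take chunk
lemma take_succ_chunk (L : List Int) (b s : Nat) (hbs : b ≤ s) (hs : s < L.length) :
    (L.drop b).take (s + 1 - b) = (L.drop b).take (s - b) ++ [L.getD s 0] := by
  have h1 : s + 1 - b = (s - b) + 1 := by omega
  rw [h1, List.take_add_one]
  have h2 : (L.drop b)[s - b]? = L[s]? := by
    rw [List.getElem?_drop]
    congr 1
    omega
  rw [h2, List.getElem?_eq_getElem hs]
  simp [List.getD_eq_getElem?_getD, List.getElem?_eq_getElem hs]

-- master lemma: the chunk fold over the cuts of ts (from offset s, pending run from b)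
-- produces the pending chunk followed by the kept elements
lemma chunksFold_eq (L : List Int) (ts : List Int) (s b : Nat) (acc : List Int)
    (hbs : b ≤ s)
    (hkept : ∀ i ∈ keptFrom ts s, i < L.length) :
    chunksFold L ((cutsFrom ts s).map (Nat.cast : Nat → Int) ++ [((s + ts.length : Nat) : Int)])
        (b : Int) acc
      = (((s + ts.length : Nat) : Int) + 1,
         acc ++ (L.drop b).take (s - b) ++ (keptFrom ts s).map (fun i => L.getD i 0)) := by
  induction ts generalizing s b acc with
  | nil =>
    simp [chunksFold, cutsFrom, keptFrom, PySem.List.slice_natCast]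
  | cons t ts ih =>
    have hlen : s + (t :: ts).length = (s + 1) + ts.length := by simp only [List.length_cons]; omega
    by_cases h : t = 3
    · -- a cut at s: emit the pending chunk, restart the run at s+1
      have hc : cutsFrom (t :: ts) s = s :: cutsFrom ts (s + 1) := by
        simp [cutsFrom, h]
      have hk : keptFrom (t :: ts) s = keptFrom ts (s + 1) := by
        simp [keptFrom, h]
      rw [hlen, hc, hk, List.map_cons, List.cons_append]
      have hstep : chunksFold L
            (((s : Nat) : Int) :: ((cutsFrom ts (s + 1)).map (Nat.cast : Nat → Int) ++ [(((s + 1) + ts.length : Nat) : Int)]))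
            (b : Int) acc
          = chunksFold L ((cutsFrom ts (s + 1)).map (Nat.cast : Nat → Int) ++ [(((s + 1) + ts.length : Nat) : Int)])
            (((s : Nat) : Int) + 1) (acc ++ PySem.List.slice L (some (b : Int)) (some ((s : Nat) : Int))) := rfl
      rw [hstep, show ((s : Nat) : Int) + 1 = ((s + 1 : Nat) : Int) by push_cast; ring,
          PySem.List.slice_natCast,
          ih (s + 1) (s + 1) _ (le_refl _) (by rw [← hk]; exact hkept)]
      simp
    · -- s is kept: the pending run extends over s
      have hc : cutsFrom (t :: ts) s = cutsFrom ts (s + 1) := by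
        simp [cutsFrom, h]
      have hk : keptFrom (t :: ts) s = s :: keptFrom ts (s + 1) := by
        simp [keptFrom, h]
      have hsL : s < L.length := hkept s (by rw [hk]; exact List.mem_cons_self)
      rw [hlen, hc, hk,
          ih (s + 1) b acc (by omega) (fun i hi => hkept i (by rw [hk]; exact List.mem_cons_of_mem _ hi)),
          take_succ_chunk L b s hbs hsL]
      simp

-- ===== VERDICT (by name: the statement is the Claim_ definition above) =====
theorem remove_slur_spec : Claim_equal_remove_slur := by
  intro types pitches note_durs ph_tokens _ hpre
  unfold Spec_remove_slur remove_slur remove_slur_alt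
  -- facts about kept indices, from Pre_ and from keptFrom's bound
  have hkmem : ∀ i ∈ keptFrom types 0, i < types.length ∧ types.getD i 0 ≠ 3 := by
    intro i hi
    obtain ⟨_, h2, h3⟩ := mem_keptFrom types 0 i hi
    exact ⟨by omega, by simpa using h3⟩
  have hkT : ∀ i ∈ keptFrom types 0, i < types.length := fun i hi => (hkmem i hi).1
  have hkP : ∀ i ∈ keptFrom types 0, i < pitches.length := by
    intro i hi
    exact (hpre i (List.mem_range.2 (hkmem i hi).1) (hkmem i hi).2).1
  have hkD : ∀ i ∈ keptFrom types 0, i < note_durs.length := by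
    intro i hi
    exact (hpre i (List.mem_range.2 (hkmem i hi).1) (hkmem i hi).2).2.1
  have hkK : ∀ i ∈ keptFrom types 0, i < ph_tokens.length := by
    intro i hi
    exact (hpre i (List.mem_range.2 (hkmem i hi).1) (hkmem i hi).2).2.2
  -- B side: rewrite the cuts list into cast form and evaluate the four chunk folds
  have hn : (types.length : Int) = ((0 + types.length : Nat) : Int) := by push_cast; ring
  have hcuts : (((PySem.List.enumerate types).filter (fun p => p.2 = 3)).map (·.1)) ++ [(types.length : Int)]
      = (cutsFrom types 0).map (Nat.cast : Nat → Int) ++ [((0 + types.length : Nat) : Int)] := by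
    rw [hn]
    congr 1
    have := filter_eq_eq_cutsFrom types 0
    simpa using this
  have hB := foldB_tuple types pitches note_durs ph_tokens
      ((cutsFrom types 0).map (Nat.cast : Nat → Int) ++ [((0 + types.length : Nat) : Int)]) 0 [] [] [] []
  have h0 : ((0 : Nat) : Int) = (0 : Int) := by norm_num
  have hCT := chunksFold_eq types types 0 0 [] (le_refl 0) hkT
  have hCP := chunksFold_eq pitches types 0 0 [] (le_refl 0) hkP
  have hCD := chunksFold_eq note_durs types 0 0 [] (le_refl 0) hkD
  have hCK := chunksFold_eq ph_tokens types 0 0 [] (le_refl 0) hkK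
  rw [h0] at hCT hCP hCD hCK
  simp only [hcuts, hB, hCT, hCP, hCD, hCK]
  -- A side
  rw [foldA_eq]
  have hkept := filter_ne_eq_keptFrom types 0
  simp only [Nat.cast_zero] at hkept
  have hmap : ∀ (L : List Int),
      (((PySem.List.enumerate types).filter (fun p => p.2 ≠ 3)).map (·.1)).map (fun i => PySem.List.pyGetD L i 0)
        = (keptFrom types 0).map (fun i => L.getD i 0) := by
    intro L
    rw [hkept, List.map_map]
    exact List.map_congr_left fun i _ => by simp [PySem.List.pyGetD_natCast]
  have hfst : ((PySem.List.enumerate types).filter (fun p => p.2 ≠ 3)).map (·.2)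
      = (keptFrom types 0).map (fun i => types.getD i 0) := by
    rw [← hmap types]
    rw [List.map_map]
    exact List.map_congr_left fun p hp => by
      have := snd_eq_pyGetD types p (List.mem_of_mem_filter hp)
      simpa using this
  simp only [List.nil_append, Nat.sub_self, List.take_zero, List.drop_zero]
  rw [hfst, hmap pitches, hmap note_durs, hmap ph_tokens]
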